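-- pv_equiv track=rewrite | github.com/stanislavkozlovski/python_exercises | hackerrank/algorithms/strings/super_reduced_string.py | get_removable_indices
-- ===== SOURCE A (Python) =====
-- def get_removable_indices(string: str):
--     valid_indices = set()
--     last_idx = None  # use this to keep track of repeating words, i.e "aaa" - we should only get [0, 1] as indices
--     for idx in range(1, len(string)):
--         if string[idx] == string[idx-1] and last_idx != idx-1:
--             last_idx = idx
--             valid_indices.add(idx-1)
--             valid_indices.add(idx)
--     return valid_indices
-- ===== SOURCE B (Python) =====
-- def get_removable_indices(string: str):
--     valid = set()
--     chars = list(string)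
--     n = len(chars)
--     start = 0
--     while start < n:
--         # length of the maximal run of equal characters beginning at start
--         run = 1
--         while start + run < n and chars[start + run] == chars[start]:
--             run += 1
--         # an even prefix of every run is removable (all of it if the run length is even)
--         valid.update(range(start, start + run - run % 2))
--         start += run
--     return valid
-- ===== Notes on version B (the rewrite author's own statement) =====
-- stated objective: alternative
-- what changed: Instead of a single adjacency scan guarded by a last-paired-index sentinel, B decomposes the string into maximal runs of equal characters and emits the contiguous removable index range [start, start + L - L%2) for each run of length L.
import Mathlib
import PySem

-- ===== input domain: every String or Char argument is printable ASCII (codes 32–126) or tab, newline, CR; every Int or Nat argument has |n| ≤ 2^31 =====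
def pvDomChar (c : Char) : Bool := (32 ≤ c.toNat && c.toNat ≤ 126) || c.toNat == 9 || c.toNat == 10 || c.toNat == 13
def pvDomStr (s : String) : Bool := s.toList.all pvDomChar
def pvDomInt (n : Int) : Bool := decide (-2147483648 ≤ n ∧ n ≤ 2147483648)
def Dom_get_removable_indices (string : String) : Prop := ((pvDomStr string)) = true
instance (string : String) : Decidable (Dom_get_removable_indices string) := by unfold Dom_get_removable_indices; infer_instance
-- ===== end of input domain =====

-- B replaces A's adjacency scan with a last-paired-index sentinel by a run decomposition
-- that emits the removable index range of each maximal run; alternative structure, same cost.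

-- ===== PORT A =====
-- for idx in range(1, len(string)): if string[idx] == string[idx-1] and last_idx != idx-1: …
def get_removable_indices (string : String) : List Int :=
  (((PySem.List.pyRange 1 (PySem.Str.len string) 1).foldl
    (fun (st : PySem.Set Int × Option Int) (idx : Int) =>
      if PySem.Str.pyGet? string idx = PySem.Str.pyGet? string (idx - 1) ∧ st.2 ≠ some (idx - 1) then
        (PySem.Set.add (PySem.Set.add st.1 (idx - 1)) idx, some idx)
      else st)
    (PySem.Set.empty, none)) : PySem.Set Int × Option Int).1

-- ===== PORT B =====
-- _run_len(c, chars): length of the leading run of c in chars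
def pvRunLen (c : Char) : List Char → Nat
  | [] => 0
  | d :: ds => if d = c then 1 + pvRunLen c ds else 0

-- _collect(chars, start): removable index ranges, one maximal run at a time
def pvCollect : List Char → Int → List Int
  | [], _ => []
  | c :: cs, start =>
    let run : Nat := 1 + pvRunLen c cs
    let removable : Nat := run - run % 2
    PySem.List.pyRange start (start + (removable : Int)) 1 ++
      pvCollect ((c :: cs).drop run) (start + (run : Int))
termination_by cs => cs.length
decreasing_by simp

def get_removable_indices_alt (string : String) : List Int :=
  PySem.Set.ofList (pvCollect string.toList 0)

-- ===== PRECONDITION & SPEC =====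
def Spec_get_removable_indices (string : String) (out : List Int) : Prop := out = get_removable_indices_alt string
instance (string : String) (out : List Int) : Decidable (Spec_get_removable_indices string out) := by unfold Spec_get_removable_indices; infer_instance

-- ===== CLAIM (what is proved, stated in full; the proofs are below) =====
def Claim_equal_get_removable_indices : Prop := ∀ (string : String), Dom_get_removable_indices string → Spec_get_removable_indices string (get_removable_indices string)

-- ===== LEMMAS AND PROOFS =====

-- A's loop body, over the character list
def pvStep (L : List Char) (st : PySem.Set Int × Option Int) (idx : Int) :
    PySem.Set Int × Option Int :=
  if PySem.List.pyGet? L idx = PySem.List.pyGet? L (idx - 1) ∧ st.2 ≠ some (idx - 1) then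
    (PySem.Set.add (PySem.Set.add st.1 (idx - 1)) idx, some idx)
  else st

theorem pvRunLen_le (c : Char) (cs : List Char) : pvRunLen c cs ≤ cs.length := by
  induction cs with
  | nil => simp [pvRunLen]
  | cons d ds ih =>
    simp only [pvRunLen, List.length_cons]
    split_ifs <;> omega

theorem pvRunLen_get (c : Char) (cs : List Char) (k : Nat) (hk : k < pvRunLen c cs) :
    cs[k]? = some c := by
  induction cs generalizing k with
  | nil => simp [pvRunLen] at hk
  | cons d ds ih =>
    simp only [pvRunLen] at hk
    split_ifs at hk with h
    · cases k with
      | zero => simp [h]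
      | succ j => simpa using ih j (by omega)
    · omega

theorem pvRunLen_stop (c : Char) (cs : List Char) (h : pvRunLen c cs < cs.length) :
    cs[pvRunLen c cs]? ≠ some c := by
  induction cs with
  | nil => simp at h
  | cons d ds ih =>
    simp only [pvRunLen, List.length_cons] at h ⊢
    split_ifs at h ⊢ with hd
    · rw [Nat.add_comm]
      simpa using ih (by omega)
    · simpa using hd


theorem pvStep_pos (L : List Char) (st : PySem.Set Int × Option Int) (idx : Int)
    (h1 : PySem.List.pyGet? L idx = PySem.List.pyGet? L (idx - 1))
    (h2 : st.2 ≠ some (idx - 1)) :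
    pvStep L st idx = (PySem.Set.add (PySem.Set.add st.1 (idx - 1)) idx, some idx) := by
  unfold pvStep; rw [if_pos ⟨h1, h2⟩]

theorem pvStep_neg (L : List Char) (st : PySem.Set Int × Option Int) (idx : Int)
    (h : ¬ (PySem.List.pyGet? L idx = PySem.List.pyGet? L (idx - 1) ∧ st.2 ≠ some (idx - 1))) :
    pvStep L st idx = st := by
  unfold pvStep; rw [if_neg h]

theorem pvCollect_cons (c : Char) (cs : List Char) (s : Int) :
    pvCollect (c :: cs) s =
      PySem.List.pyRange s (s + (((1 + pvRunLen c cs) - (1 + pvRunLen c cs) % 2 : Nat) : Int)) 1 ++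
        pvCollect ((c :: cs).drop (1 + pvRunLen c cs)) (s + ((1 + pvRunLen c cs : Nat) : Int)) := by
  rw [pvCollect]

theorem pvCollect_ge_aux : ∀ (n : Nat) (cs : List Char) (s : Int), cs.length ≤ n →
    ∀ x ∈ pvCollect cs s, s ≤ x := by
  intro n
  induction n with
  | zero =>
    intro cs s hn x hx
    have : cs = [] := List.eq_nil_of_length_eq_zero (by omega)
    subst this
    rw [pvCollect] at hx
    simp at hx
  | succ n ihn =>
    intro cs s hn x hx
    cases cs with
    | nil => rw [pvCollect] at hx; simp at hx
    | cons c cs' =>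
      rw [pvCollect_cons] at hx
      rcases List.mem_append.1 hx with h | h
      · exact (PySem.List.mem_pyRange_one.1 h).1
      · have hrle := pvRunLen_le c cs'
        have := ihn _ _ (by simp only [List.length_drop, List.length_cons] at hn ⊢; omega) x h
        omega

theorem pvCollect_ge (cs : List Char) (s : Int) : ∀ x ∈ pvCollect cs s, s ≤ x :=
  pvCollect_ge_aux cs.length cs s (le_refl _)

theorem pvCollect_nodup_aux : ∀ (n : Nat) (cs : List Char) (s : Int), cs.length ≤ n →
    (pvCollect cs s).Nodup := by
  intro n
  induction n with
  | zero =>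
    intro cs s hn
    have : cs = [] := List.eq_nil_of_length_eq_zero (by omega)
    subst this
    rw [pvCollect]; simp
  | succ n ihn =>
    intro cs s hn
    cases cs with
    | nil => rw [pvCollect]; simp
    | cons c cs' =>
      rw [pvCollect_cons]
      have hrle := pvRunLen_le c cs'
      refine List.Nodup.append (PySem.List.nodup_pyRange_one _ _)
        (ihn _ _ (by simp only [List.length_drop, List.length_cons] at hn ⊢; omega)) ?_
      intro x hx hx'
      have h1 := (PySem.List.mem_pyRange_one.1 hx).2
      have h2 := pvCollect_ge _ _ x hx'
      have h3 : (1 + pvRunLen c cs') - (1 + pvRunLen c cs') % 2 ≤ 1 + pvRunLen c cs' := by omega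
      push_cast at h1 h2 ⊢
      omega

theorem pvCollect_nodup (cs : List Char) (s : Int) : (pvCollect cs s).Nodup :=
  pvCollect_nodup_aux cs.length cs s (le_refl _)
-- run-internal part of A's loop: indices p+1 .. p+r-1 all compare equal characters
theorem pvInner (L : List Char) : ∀ (r : Nat) (p : Int) (acc : List Int) (last : Option Int),
    (∀ k : Nat, k < r → PySem.List.pyGet? L (p + (k : Int)) = PySem.List.pyGet? L p) →
    (∀ x ∈ acc, x < p) → (∀ v, last = some v → v < p) →
    (PySem.List.pyRange (p + 1) (p + (r : Int)) 1).foldl (pvStep L) (acc, last) =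
      (acc ++ PySem.List.pyRange p (p + ((r - r % 2 : Nat) : Int)) 1,
        if r ≤ 1 then last else some (p + ((r - r % 2 : Nat) : Int) - 1)) := by
  intro r
  induction r using Nat.strong_induction_on with
  | _ r ih =>
  intro p acc last hchar hacc hlast
  by_cases hr : r ≤ 1
  · rw [show r - r % 2 = 0 by omega]
    rw [PySem.List.pyRange_one_eq_nil (show p + (r : Int) ≤ p + 1 by omega)]
    rw [PySem.List.pyRange_one_eq_nil (show p + ((0 : Nat) : Int) ≤ p by omega)]
    simp [hr]
  · obtain ⟨k, rfl⟩ : ∃ k, r = k + 2 := ⟨r - 2, by omega⟩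
    clear hr
    rw [PySem.List.pyRange_one_cons (show p + 1 < p + ((k + 2 : Nat) : Int) by push_cast; omega),
      List.foldl_cons]
    have hpp : (p : Int) + 1 - 1 = p := by ring
    have e1 : pvStep L (acc, last) (p + 1) = (acc ++ [p, p + 1], some (p + 1)) := by
      have hc1 : PySem.List.pyGet? L (p + 1) = PySem.List.pyGet? L (p + 1 - 1) := by
        have := hchar 1 (by omega)
        push_cast at this
        rw [hpp]; exact this
      have hl1 : (last : Option Int) ≠ some (p + 1 - 1) := by
        intro hc
        have := hlast _ hc
        omega
      rw [pvStep_pos L _ _ hc1 hl1, hpp]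
      have hp0 : (p : Int) ∉ acc := fun h => absurd (hacc p h) (by omega)
      have hp1 : (p + 1) ∉ acc ++ [p] := by
        intro h
        rcases List.mem_append.1 h with h | h
        · have := hacc _ h; omega
        · simp at h
      rw [show (acc, last).1 = acc from rfl, PySem.Set.add_of_not_mem hp0,
        PySem.Set.add_of_not_mem hp1]
      simp
    rw [e1]
    by_cases hk : k = 0
    · subst hk
      rw [PySem.List.pyRange_one_eq_nil
        (show p + ((0 + 2 : Nat) : Int) ≤ p + 1 + 1 by push_cast; omega)]
      rw [List.foldl_nil]
      rw [show (0 + 2 : Nat) - (0 + 2) % 2 = 2 by norm_num]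
      have hrange : PySem.List.pyRange p (p + ((2 : Nat) : Int)) 1 = [p, p + 1] := by
        rw [PySem.List.pyRange_one_cons (by push_cast; omega)]
        rw [PySem.List.pyRange_one_cons (by push_cast; omega)]
        rw [PySem.List.pyRange_one_eq_nil (by push_cast; omega)]
      rw [hrange]
      rw [if_neg (by omega : ¬ (0 + 2 : Nat) ≤ 1)]
      congr 1
      push_cast
      ring
    · rw [show (p : Int) + 1 + 1 = p + 2 by ring]
      rw [PySem.List.pyRange_one_cons
        (show (p : Int) + 2 < p + ((k + 2 : Nat) : Int) by push_cast; omega),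
        List.foldl_cons]
      have e2 : pvStep L (acc ++ [p, p + 1], some (p + 1)) (p + 2) = (acc ++ [p, p + 1], some (p + 1)) := by
        apply pvStep_neg
        rintro ⟨-, h2⟩
        exact h2 (by rw [show (p : Int) + 2 - 1 = p + 1 by ring])
      rw [e2]
      have hchar' : ∀ j : Nat, j < k →
          PySem.List.pyGet? L (p + 2 + (j : Int)) = PySem.List.pyGet? L (p + 2) := by
        intro j hj
        have a1 := hchar (2 + j) (by omega)
        have a2 := hchar 2 (by omega)
        push_cast at a1 a2
        rw [show (p : Int) + 2 + (j : Int) = p + (2 + (j : Int)) by ring, a1]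
        rw [show (p : Int) + 2 = p + (2 : Int) from rfl, a2]
      have hacc' : ∀ x ∈ acc ++ [p, p + 1], x < p + 2 := by
        intro x hx
        rcases List.mem_append.1 hx with h | h
        · have := hacc _ h; omega
        · simp at h; rcases h with h | h <;> omega
      have hlast' : ∀ v : Int, (some (p + 1) : Option Int) = some v → v < p + 2 := by
        intro v hv; injection hv with hv; omega
      rw [show (p : Int) + 2 + 1 = (p + 2) + 1 by ring,
        show (p : Int) + ((k + 2 : Nat) : Int) = (p + 2) + ((k : Nat) : Int) by push_cast; ring]
      rw [ih k (by omega) (p + 2) (acc ++ [p, p + 1]) (some (p + 1)) hchar' hacc' hlast']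
      have hm : (k + 2) - (k + 2) % 2 = (k - k % 2) + 2 := by omega
      rw [hm]
      have hrange : PySem.List.pyRange p (p + (((k - k % 2) + 2 : Nat) : Int)) 1 =
          [p, p + 1] ++ PySem.List.pyRange (p + 2) (p + 2 + ((k - k % 2 : Nat) : Int)) 1 := by
        rw [PySem.List.pyRange_one_cons (by push_cast; omega)]
        rw [PySem.List.pyRange_one_cons (by push_cast; omega)]
        rw [show (p : Int) + 1 + 1 = p + 2 by ring,
          show (p : Int) + (((k - k % 2) + 2 : Nat) : Int) = p + 2 + ((k - k % 2 : Nat) : Int) by push_cast; ring]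
        simp
      rw [hrange]
      refine Prod.ext ?_ ?_
      · simp
      · by_cases hk1 : k ≤ 1
        · rw [if_pos hk1, if_neg (by omega : ¬ k + 2 ≤ 1), show k - k % 2 = 0 by omega]
          simp only
          congr 1
          push_cast
          ring
        · rw [if_neg hk1, if_neg (by omega : ¬ k + 2 ≤ 1)]
          simp only
          congr 1
          push_cast
          ring

-- A's whole loop, one maximal run at a time
theorem pvOuter : ∀ (n : Nat) (cs pre : List Char) (acc : List Int) (last : Option Int),
    cs.length ≤ n →
    (∀ x ∈ acc, x < (pre.length : Int)) →
    (∀ v, last = some v → v < (pre.length : Int)) →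
    ∃ last',
      (PySem.List.pyRange ((pre.length : Int) + 1) ((pre.length : Int) + (cs.length : Int)) 1).foldl
          (pvStep (pre ++ cs)) (acc, last) =
        (acc ++ pvCollect cs (pre.length : Int), last') ∧
      (∀ v, last' = some v → v < (pre.length : Int) + (cs.length : Int)) := by
  intro n
  induction n with
  | zero =>
    intro cs pre acc last hlen hacc hlast
    have : cs = [] := List.eq_nil_of_length_eq_zero (by omega)
    subst this
    refine ⟨last, ?_, ?_⟩
    · rw [PySem.List.pyRange_one_eq_nil
        (show (pre.length : Int) + ((([] : List Char).length : Nat) : Int) ≤ (pre.length : Int) + 1 by simp),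
        pvCollect]
      simp
    · intro v hv
      have := hlast v hv
      simpa using (by omega : v < (pre.length : Int) + 0)
  | succ n ihn =>
    intro cs pre acc last hlen hacc hlast
    cases cs with
    | nil =>
      refine ⟨last, ?_, ?_⟩
      · rw [PySem.List.pyRange_one_eq_nil
          (show (pre.length : Int) + ((([] : List Char).length : Nat) : Int) ≤ (pre.length : Int) + 1 by simp),
          pvCollect]
        simp
      · intro v hv
        have := hlast v hv
        simpa using (by omega : v < (pre.length : Int) + 0)
    | cons c cs' =>
      have hrle := pvRunLen_le c cs'
      have hval : ∀ k : Nat, k < 1 + pvRunLen c cs' → (c :: cs')[k]? = some c := by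
        intro k hk
        match k with
        | 0 => rfl
        | j + 1 => simpa using pvRunLen_get c cs' j (by omega)
      have hchar : ∀ k : Nat, k < 1 + pvRunLen c cs' →
          PySem.List.pyGet? (pre ++ (c :: cs')) ((pre.length : Int) + (k : Int)) =
            PySem.List.pyGet? (pre ++ (c :: cs')) ((pre.length : Int)) := by
        intro k hk
        rw [PySem.List.pyGet?_append_right pre (c :: cs') k, hval k hk]
        have h0 := PySem.List.pyGet?_append_right pre (c :: cs') 0
        rw [show ((pre.length : Int) + ((0 : Nat) : Int)) = (pre.length : Int) by push_cast; ring] at h0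
        rw [h0]
        rfl
      -- split the index range at the end of the first run
      rw [PySem.List.pyRange_one_append ((pre.length : Int) + 1)
            ((pre.length : Int) + ((1 + pvRunLen c cs' : Nat) : Int))
            ((pre.length : Int) + (((c :: cs').length : Nat) : Int))
            (by push_cast; omega) (by simp only [List.length_cons]; push_cast; omega),
          List.foldl_append]
      rw [pvInner (pre ++ (c :: cs')) (1 + pvRunLen c cs') ((pre.length : Int)) acc last
            hchar hacc hlast]
      have hacc1 : ∀ x ∈ acc ++ PySem.List.pyRange ((pre.length : Int))
          ((pre.length : Int) + (((1 + pvRunLen c cs') - (1 + pvRunLen c cs') % 2 : Nat) : Int)) 1,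
          x < (pre.length : Int) + ((1 + pvRunLen c cs' : Nat) : Int) := by
        intro x hx
        rcases List.mem_append.1 hx with h | h
        · have := hacc _ h; omega
        · have := (PySem.List.mem_pyRange_one.1 h).2
          omega
      have hlast1 : ∀ v : Int,
          (if 1 + pvRunLen c cs' ≤ 1 then last
            else some ((pre.length : Int) +
              (((1 + pvRunLen c cs') - (1 + pvRunLen c cs') % 2 : Nat) : Int) - 1)) = some v →
          v < (pre.length : Int) + ((1 + pvRunLen c cs' : Nat) : Int) := by
        intro v hv
        by_cases h1 : 1 + pvRunLen c cs' ≤ 1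
        · rw [if_pos h1] at hv
          have := hlast v hv
          omega
        · rw [if_neg h1] at hv
          injection hv with hv
          omega
      by_cases hend : 1 + pvRunLen c cs' = (c :: cs').length
      · -- the run reaches the end of the string: nothing remains to fold
        rw [PySem.List.pyRange_one_eq_nil
          (show (pre.length : Int) + (((c :: cs').length : Nat) : Int) ≤
            (pre.length : Int) + ((1 + pvRunLen c cs' : Nat) : Int) by omega)]
        refine ⟨_, ?_, by rw [show (((c :: cs').length : Nat) : Int) =
          ((1 + pvRunLen c cs' : Nat) : Int) by rw [hend]]; exact hlast1⟩
        rw [List.foldl_nil, pvCollect_cons]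
        have hdrop : (c :: cs').drop (1 + pvRunLen c cs') = [] :=
          List.drop_eq_nil_of_le (by omega)
        rw [hdrop, pvCollect]
        simp
      · -- boundary index: the characters differ there, the state passes through unchanged
        have hlt : 1 + pvRunLen c cs' < (c :: cs').length :=
          lt_of_le_of_ne (by simp only [List.length_cons]; omega) hend
        rw [PySem.List.pyRange_one_cons
          (show (pre.length : Int) + ((1 + pvRunLen c cs' : Nat) : Int) <
            (pre.length : Int) + (((c :: cs').length : Nat) : Int) by omega)]
        rw [List.foldl_cons]
        have hbound : ∀ st : PySem.Set Int × Option Int,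
            pvStep (pre ++ (c :: cs')) st
              ((pre.length : Int) + ((1 + pvRunLen c cs' : Nat) : Int)) = st := by
          intro st
          apply pvStep_neg
          rintro ⟨h1, -⟩
          rw [show (pre.length : Int) + ((1 + pvRunLen c cs' : Nat) : Int) - 1 =
              (pre.length : Int) + ((pvRunLen c cs' : Nat) : Int) by push_cast; ring] at h1
          rw [PySem.List.pyGet?_append_right pre (c :: cs') (1 + pvRunLen c cs'),
            PySem.List.pyGet?_append_right pre (c :: cs') (pvRunLen c cs')] at h1
          rw [hval (pvRunLen c cs') (by omega)] at h1
          have hstop := pvRunLen_stop c cs' (by simp only [List.length_cons] at hlt; omega)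
          rw [show (1 + pvRunLen c cs') = pvRunLen c cs' + 1 by omega] at h1
          rw [List.getElem?_cons_succ] at h1
          exact hstop h1
        rw [hbound]
        -- recurse on the rest of the string, with the processed run moved into the prefix
        have hLeq : pre ++ (c :: cs') =
            (pre ++ (c :: cs').take (1 + pvRunLen c cs')) ++ (c :: cs').drop (1 + pvRunLen c cs') := by
          rw [List.append_assoc, List.take_append_drop]
        have hlen' : (((pre ++ (c :: cs').take (1 + pvRunLen c cs')).length : Nat) : Int) =
            (pre.length : Int) + ((1 + pvRunLen c cs' : Nat) : Int) := by
          simp [List.length_take]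
          omega
        obtain ⟨last2, hfold2, hbnd2⟩ := ihn ((c :: cs').drop (1 + pvRunLen c cs'))
          (pre ++ (c :: cs').take (1 + pvRunLen c cs'))
          (acc ++ PySem.List.pyRange ((pre.length : Int))
            ((pre.length : Int) + (((1 + pvRunLen c cs') - (1 + pvRunLen c cs') % 2 : Nat) : Int)) 1)
          (if 1 + pvRunLen c cs' ≤ 1 then last
            else some ((pre.length : Int) +
              (((1 + pvRunLen c cs') - (1 + pvRunLen c cs') % 2 : Nat) : Int) - 1))
          (by simp only [List.length_drop, List.length_cons] at hlen ⊢; omega)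
          (by rw [hlen']; exact hacc1)
          (by rw [hlen']; exact hlast1)
        rw [← hLeq] at hfold2
        rw [hlen'] at hfold2 hbnd2
        rw [show ((((c :: cs').drop (1 + pvRunLen c cs')).length : Nat) : Int) =
            (((c :: cs').length : Nat) : Int) - ((1 + pvRunLen c cs' : Nat) : Int) by
          simp only [List.length_drop, List.length_cons]; omega] at hfold2 hbnd2
        rw [show (pre.length : Int) + ((1 + pvRunLen c cs' : Nat) : Int) +
            ((((c :: cs').length : Nat) : Int) - ((1 + pvRunLen c cs' : Nat) : Int)) =
            (pre.length : Int) + (((c :: cs').length : Nat) : Int) by ring] at hfold2 hbnd2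
        rw [hfold2]
        refine ⟨last2, ?_, hbnd2⟩
        rw [pvCollect_cons]
        simp [List.append_assoc]

theorem get_removable_indices_eq_fold (s : String) :
    get_removable_indices s =
      ((PySem.List.pyRange 1 ((s.toList.length : Int)) 1).foldl (pvStep s.toList)
        (([] : List Int), (none : Option Int))).1 := by
  unfold get_removable_indices
  rw [PySem.Str.len_eq]
  rfl

-- ===== VERDICT (by name: the statement is the Claim_ definition above) =====
theorem get_removable_indices_spec : Claim_equal_get_removable_indices := by
  intro s _
  unfold Spec_get_removable_indices get_removable_indices_alt
  obtain ⟨last', hfold, -⟩ := pvOuter (s.toList.length) s.toList [] [] none (le_refl _)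
    (by simp) (by simp)
  simp only [List.nil_append, List.length_nil, Nat.cast_zero, zero_add] at hfold
  rw [get_removable_indices_eq_fold s, hfold]
  exact (PySem.Set.ofList_eq_self_of_nodup _ (pvCollect_nodup _ _)).symm
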